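-- pv_equiv track=rewrite | github.com/FredGoor/decodepipe | run_decodingpipe.py | _guess_baseline_column
-- ===== SOURCE A (Python) =====
-- def _guess_baseline_column(colnames) -> str:
--     cols = [str(c).strip() for c in colnames]
--     if not cols:
--         return ""
--     low = [c.lower() for c in cols]
--
--     candidates = [
--         "genome locus tags",
--         "genome",
--         "all genes",
--         "allgenes",
--         "all",
--         "baseline",
--     ]
--     for want in candidates:
--         for c, cl in zip(cols, low):
--             if want == cl:
--                 return c
--     for c, cl in zip(cols, low):
--         if "genome" in cl and "tag" in cl:
--             return c
--     for c, cl in zip(cols, low):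
--         if "all" in cl and "gene" in cl:
--             return c
--     return cols[0]
-- ===== SOURCE B (Python) =====
-- def _guess_baseline_column(colnames) -> str:
--     candidates = [
--         "genome locus tags",
--         "genome",
--         "all genes",
--         "allgenes",
--         "all",
--         "baseline",
--     ]
--     best = None  # (rank, index, stripped column)
--     for i, c in enumerate(colnames):
--         s = str(c).strip()
--         l = s.lower()
--         if l in candidates:
--             r = candidates.index(l)
--         elif "genome" in l and "tag" in l:
--             r = 6
--         elif "all" in l and "gene" in l:
--             r = 7
--         else:
--             r = 8
--         if best is None or (r, i) < (best[0], best[1]):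
--             best = (r, i, s)
--     return best[2] if best is not None else ""
-- ===== Notes on version B (the rewrite author's own statement) =====
-- stated objective: alternative
-- what changed: A's four ordered scans (candidate-major exact-match double loop, a genome/tag substring scan, an all/gene substring scan, then the cols[0] fallback) are replaced by a single left-to-right pass that assigns each column a priority rank (0-5 exact candidate, 6 genome&tag, 7 all&gene, 8 otherwise) and keeps the (rank, index)-lexicographically minimal column.
import Mathlib
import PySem

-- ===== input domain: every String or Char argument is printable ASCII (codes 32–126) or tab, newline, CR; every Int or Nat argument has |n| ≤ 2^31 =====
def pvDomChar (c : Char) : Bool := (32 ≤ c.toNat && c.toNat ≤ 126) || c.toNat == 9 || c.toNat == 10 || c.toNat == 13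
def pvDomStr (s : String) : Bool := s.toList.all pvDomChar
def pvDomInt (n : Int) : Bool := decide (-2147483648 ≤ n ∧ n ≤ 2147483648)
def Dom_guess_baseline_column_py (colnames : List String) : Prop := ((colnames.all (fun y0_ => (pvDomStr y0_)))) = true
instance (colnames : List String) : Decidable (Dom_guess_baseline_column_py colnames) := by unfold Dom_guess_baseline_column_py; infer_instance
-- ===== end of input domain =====

-- B replaces A's four ordered scans (candidate-major exact-match loop, two substring
-- scans, cols[0] fallback) by a single left-to-right pass that scores each column with a
-- priority rank and keeps the (rank, index)-minimal one; objective: alternative.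

def pyCandidates : List String :=
  ["genome locus tags", "genome", "all genes", "allgenes", "all", "baseline"]

-- ===== PORT A =====
-- inner loop 'for c, cl in zip(cols, low): if want == cl: return c'
def pvAScan (w : String) : List (String × String) → Option String
  | [] => none
  | p :: rest => if w == p.2 then some p.1 else pvAScan w rest

-- outer loop 'for want in candidates: …'
def pvAExact : List String → List (String × String) → Option String
  | [], _ => none
  | w :: ws, ps =>
    match pvAScan w ps with
    | some c => some c
    | none => pvAExact ws ps

-- 'for c, cl in zip(cols, low): if f(cl): return c'
def pvAFind (f : String → Bool) : List (String × String) → Option String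
  | [] => none
  | p :: rest => if f p.2 then some p.1 else pvAFind f rest

def guess_baseline_column_py (colnames : List String) : String :=
  let cols := colnames.map (fun c => PySem.Str.strip c)
  match cols with
  | [] => ""   -- 'if not cols: return ""'
  | c0 :: _ =>  -- c0 = cols[0], the final fallback
    let low := cols.map (fun c => PySem.Str.lower c)
    let ps := cols.zip low
    match pvAExact pyCandidates ps with
    | some c => c
    | none =>
      match pvAFind (fun cl => PySem.Str.isIn "genome" cl && PySem.Str.isIn "tag" cl) ps with
      | some c => c
      | none =>
        match pvAFind (fun cl => PySem.Str.isIn "all" cl && PySem.Str.isIn "gene" cl) ps with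
        | some c => c
        | none => c0

-- ===== PORT B =====
-- 'if l in candidates: r = candidates.index(l) elif … elif … else: r = 8'
def pvRank (l : String) : Nat :=
  match PySem.List.index? pyCandidates l with
  | some k => k
  | none =>
    if PySem.Str.isIn "genome" l && PySem.Str.isIn "tag" l then 6
    else if PySem.Str.isIn "all" l && PySem.Str.isIn "gene" l then 7
    else 8

-- 'for i, c in enumerate(colnames): … if best is None or (r, i) < (best[0], best[1]): best = (r, i, s)'
def pvBLoop : List String → Nat → Option (Nat × Nat × String) → Option (Nat × Nat × String)
  | [], _, best => best
  | c :: rest, i, best =>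
    let s := PySem.Str.strip c
    let l := PySem.Str.lower s
    let r := pvRank l
    let best' :=
      match best with
      | none => some (r, i, s)
      | some (br, bi, bs) =>
        if r < br || (r == br && decide (i < bi)) then some (r, i, s) else some (br, bi, bs)
    pvBLoop rest (i + 1) best'

def guess_baseline_column_py_alt (colnames : List String) : String :=
  match pvBLoop colnames 0 none with
  | some (_, _, s) => s
  | none => ""

-- ===== PRECONDITION & SPEC =====
def Spec_guess_baseline_column_py (colnames : List String) (out : String) : Prop := out = guess_baseline_column_py_alt colnames
instance (colnames : List String) (out : String) : Decidable (Spec_guess_baseline_column_py colnames out) := by unfold Spec_guess_baseline_column_py; infer_instance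

-- ===== CLAIM (what is proved, stated in full; the proofs are below) =====
def Claim_equal_guess_baseline_column_py : Prop := ∀ (colnames : List String), Dom_guess_baseline_column_py colnames → Spec_guess_baseline_column_py colnames (guess_baseline_column_py colnames)

-- ===== LEMMAS AND PROOFS =====

-- normalized column (stripped), its lowercase form, and the priority rank of a column
def pvS (x : String) : String := PySem.Str.strip x
def pvN (x : String) : String := PySem.Str.lower (PySem.Str.strip x)
def pvR (x : String) : Nat := pvRank (pvN x)
-- the minimal rank occurring in the list (8 if empty; every rank is ≤ 8)
def pvM (xs : List String) : Nat := (xs.map pvR).foldr min 8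
-- the stripped form of the leftmost column of minimal rank
def pvPick (xs : List String) : Option String :=
  (xs.find? (fun x => pvR x == pvM xs)).map pvS

-- closed form of pvRank
theorem pvRank_eq (l : String) : pvRank l =
    (if l = "genome locus tags" then 0 else if l = "genome" then 1
     else if l = "all genes" then 2 else if l = "allgenes" then 3
     else if l = "all" then 4 else if l = "baseline" then 5
     else if PySem.Str.isIn "genome" l && PySem.Str.isIn "tag" l then 6
     else if PySem.Str.isIn "all" l && PySem.Str.isIn "gene" l then 7 else 8) := by
  unfold pvRank pyCandidates
  by_cases h0 : l = "genome locus tags"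
  · subst h0; decide
  · rw [PySem.List.index?_cons_of_ne _ (fun h => h0 h.symm)]
    by_cases h1 : l = "genome"
    · subst h1; decide
    · rw [PySem.List.index?_cons_of_ne _ (fun h => h1 h.symm)]
      by_cases h2 : l = "all genes"
      · subst h2; decide
      · rw [PySem.List.index?_cons_of_ne _ (fun h => h2 h.symm)]
        by_cases h3 : l = "allgenes"
        · subst h3; decide
        · rw [PySem.List.index?_cons_of_ne _ (fun h => h3 h.symm)]
          by_cases h4 : l = "all"
          · subst h4; decide
          · rw [PySem.List.index?_cons_of_ne _ (fun h => h4 h.symm)]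
            by_cases h5 : l = "baseline"
            · subst h5; decide
            · rw [PySem.List.index?_cons_of_ne _ (fun h => h5 h.symm)]
              simp [h0, h1, h2, h3, h4, h5, PySem.List.index?, List.idxOf?]

theorem pvR_le8 (x : String) : pvR x ≤ 8 := by
  unfold pvR; rw [pvRank_eq]; split_ifs <;> omega

theorem pvM_le (xs : List String) (x : String) (hx : x ∈ xs) : pvM xs ≤ pvR x := by
  unfold pvM
  induction xs with
  | nil => cases hx
  | cons a l ih =>
    simp only [List.map_cons, List.foldr_cons]
    rcases List.mem_cons.1 hx with h | h
    · subst h; omega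
    · have := ih h; omega

theorem pv_foldr_min_le_init (X : List Nat) (a : Nat) : X.foldr min a ≤ a := by
  induction X with
  | nil => simp
  | cons x l ih => simp only [List.foldr_cons]; omega

theorem pv_foldr_min_init {X : List Nat} {a b : Nat} (h : a ≤ b) :
    X.foldr min a = min a (X.foldr min b) := by
  induction X with
  | nil => simp; omega
  | cons x l ih => simp only [List.foldr_cons]; omega

theorem pv_foldr_min_attain (X : List Nat) (a : Nat) :
    X.foldr min a = a ∨ X.foldr min a ∈ X := by
  induction X with
  | nil => simp
  | cons x l ih =>
    simp only [List.foldr_cons, List.mem_cons]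
    by_cases hx : x ≤ l.foldr min a
    · right; left; omega
    · rw [min_eq_right (by omega)]
      rcases ih with h | h
      · left; exact h
      · right; right; exact h

-- if the running minimum strictly drops below its seed, it is attained in the list
theorem pv_find_min_some (ds : List String) (a : Nat)
    (h : (ds.map pvR).foldr min a < a) :
    ∃ z, ds.find? (fun x => pvR x == (ds.map pvR).foldr min a) = some z := by
  rcases pv_foldr_min_attain (ds.map pvR) a with h' | h'
  · omega
  · rcases List.mem_map.1 h' with ⟨x, hx, hxr⟩
    have : (ds.find? (fun x => pvR x == (ds.map pvR).foldr min a)).isSome :=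
      List.find?_isSome.2 ⟨x, hx, by simp [hxr]⟩
    exact Option.isSome_iff_exists.1 this

theorem pvM_attained (x : String) (xs : List String) :
    ∃ y ∈ x :: xs, pvR y = pvM (x :: xs) := by
  induction xs generalizing x with
  | nil =>
    refine ⟨x, by simp, ?_⟩
    have := pvR_le8 x
    unfold pvM; simp; omega
  | cons b l ih =>
    rcases ih b with ⟨y, hy, hr⟩
    have hM : pvM (x :: b :: l) = min (pvR x) (pvM (b :: l)) := by
      unfold pvM; simp [List.foldr_cons]
    by_cases h : pvR x ≤ pvM (b :: l)
    · exact ⟨x, by simp, by omega⟩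
    · exact ⟨y, List.mem_cons_of_mem x hy, by omega⟩

theorem my_find?_congr {α} (p q : α → Bool) (xs : List α) (h : ∀ x ∈ xs, p x = q x) :
    xs.find? p = xs.find? q := by
  induction xs with
  | nil => rfl
  | cons a l ih =>
    simp only [List.find?_cons]
    rw [h a (by simp)]
    cases q a <;> simp [ih (fun x hx => h x (by simp [hx]))]

-- the zipped pairs A iterates over are a single map over the original columns
theorem pv_ps_eq (xs : List String) :
    (xs.map (fun c => PySem.Str.strip c)).zip
      ((xs.map (fun c => PySem.Str.strip c)).map (fun c => PySem.Str.lower c)) =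
    xs.map (fun x => (pvS x, pvN x)) := by
  induction xs with
  | nil => rfl
  | cons a l ih => simp only [List.map_cons, List.zip_cons_cons, ih]; rfl

theorem pvAScan_eq (w : String) (xs : List String) :
    pvAScan w (xs.map (fun x => (pvS x, pvN x))) =
    (xs.find? (fun x => w == pvN x)).map pvS := by
  induction xs with
  | nil => rfl
  | cons a l ih =>
    simp only [List.map_cons, pvAScan, List.find?_cons]
    cases h : (w == pvN a)
    · simp [ih]
    · simp

theorem pvAFind_eq (f : String → Bool) (xs : List String) :
    pvAFind f (xs.map (fun x => (pvS x, pvN x))) =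
    (xs.find? (fun x => f (pvN x))).map pvS := by
  induction xs with
  | nil => rfl
  | cons a l ih =>
    simp only [List.map_cons, pvAFind, List.find?_cons]
    cases h : f (pvN a)
    · simp [ih]
    · simp

-- exact-candidate predicates coincide with the rank predicates 0–5, pointwise
theorem pv_pred0 (x : String) : ("genome locus tags" == pvN x) = (pvR x == 0) := by
  unfold pvR; rw [pvRank_eq]
  by_cases h : pvN x = "genome locus tags"
  · simp [h]
  · rw [show ("genome locus tags" == pvN x) = false from by simp [Ne.symm h]]
    split_ifs <;> simp_all
theorem pv_pred1 (x : String) : ("genome" == pvN x) = (pvR x == 1) := by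
  unfold pvR; rw [pvRank_eq]
  by_cases h : pvN x = "genome"
  · simp [h]
  · rw [show ("genome" == pvN x) = false from by simp [Ne.symm h]]
    split_ifs <;> simp_all
theorem pv_pred2 (x : String) : ("all genes" == pvN x) = (pvR x == 2) := by
  unfold pvR; rw [pvRank_eq]
  by_cases h : pvN x = "all genes"
  · simp [h]
  · rw [show ("all genes" == pvN x) = false from by simp [Ne.symm h]]
    split_ifs <;> simp_all
theorem pv_pred3 (x : String) : ("allgenes" == pvN x) = (pvR x == 3) := by
  unfold pvR; rw [pvRank_eq]
  by_cases h : pvN x = "allgenes"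
  · simp [h]
  · rw [show ("allgenes" == pvN x) = false from by simp [Ne.symm h]]
    split_ifs <;> simp_all
theorem pv_pred4 (x : String) : ("all" == pvN x) = (pvR x == 4) := by
  unfold pvR; rw [pvRank_eq]
  by_cases h : pvN x = "all"
  · simp [h]
  · rw [show ("all" == pvN x) = false from by simp [Ne.symm h]]
    split_ifs <;> simp_all
theorem pv_pred5 (x : String) : ("baseline" == pvN x) = (pvR x == 5) := by
  unfold pvR; rw [pvRank_eq]
  by_cases h : pvN x = "baseline"
  · simp [h]
  · rw [show ("baseline" == pvN x) = false from by simp [Ne.symm h]]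
    split_ifs <;> simp_all

-- once no exact candidate matches (rank ≥ 6), the substring tests are the rank tests
theorem pv_gt_pred (x : String) (h : 6 ≤ pvR x) :
    (PySem.Str.isIn "genome" (pvN x) && PySem.Str.isIn "tag" (pvN x)) = (pvR x == 6) := by
  have hx := pvRank_eq (pvN x)
  unfold pvR at *
  split_ifs at hx <;> simp_all

theorem pv_ag_pred (x : String) (h : 7 ≤ pvR x) :
    (PySem.Str.isIn "all" (pvN x) && PySem.Str.isIn "gene" (pvN x)) = (pvR x == 7) := by
  have hx := pvRank_eq (pvN x)
  unfold pvR at *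
  split_ifs at hx <;> simp_all

-- rank-j finds below the minimum are empty
theorem pv_find_none (xs : List String) (j : Nat) (hj : j < pvM xs) :
    xs.find? (fun x => pvR x == j) = none := by
  rw [List.find?_eq_none]
  intro x hx
  have := pvM_le xs x hx
  simp; omega

-- A = leftmost column of minimal rank, for nonempty input
theorem pvA_char (c : String) (cs : List String) :
    guess_baseline_column_py (c :: cs) = (pvPick (c :: cs)).getD (pvS c) := by
  unfold guess_baseline_column_py
  simp only [List.map_cons, List.zip_cons_cons, pv_ps_eq]
  rw [show ((PySem.Str.strip c, PySem.Str.lower (PySem.Str.strip c)) ::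
        List.map (fun x => (pvS x, pvN x)) cs) =
      (c :: cs).map (fun x => (pvS x, pvN x)) from rfl]
  set xs := c :: cs with hxs
  simp only [pvAExact, pyCandidates, pvAScan_eq, pvAFind_eq]
  rw [my_find?_congr _ _ xs (fun x _ => pv_pred0 x),
      my_find?_congr _ _ xs (fun x _ => pv_pred1 x),
      my_find?_congr _ _ xs (fun x _ => pv_pred2 x),
      my_find?_congr _ _ xs (fun x _ => pv_pred3 x),
      my_find?_congr _ _ xs (fun x _ => pv_pred4 x),
      my_find?_congr _ _ xs (fun x _ => pv_pred5 x)]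
  have hM8 : pvM xs ≤ 8 := le_trans (pvM_le xs c (by simp [hxs])) (pvR_le8 c)
  obtain ⟨y, hy, hyr⟩ := pvM_attained c cs
  rw [← hxs] at hy hyr
  have hz : ∃ z, xs.find? (fun x => pvR x == pvM xs) = some z :=
    Option.isSome_iff_exists.1 (List.find?_isSome.2 ⟨y, hy, by simp [hyr]⟩)
  obtain ⟨z, hz⟩ := hz
  have hpick : (pvPick xs).getD (pvS c) = pvS z := by
    unfold pvPick; rw [hz]; rfl
  rw [hpick]
  interval_cases hm : pvM xs
  · rw [hz]; rfl
  · rw [pv_find_none xs 0 (by omega), hz]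
    rfl
  · rw [pv_find_none xs 0 (by omega), pv_find_none xs 1 (by omega), hz]
    rfl
  · rw [pv_find_none xs 0 (by omega), pv_find_none xs 1 (by omega),
        pv_find_none xs 2 (by omega), hz]
    rfl
  · rw [pv_find_none xs 0 (by omega), pv_find_none xs 1 (by omega),
        pv_find_none xs 2 (by omega), pv_find_none xs 3 (by omega), hz]
    rfl
  · rw [pv_find_none xs 0 (by omega), pv_find_none xs 1 (by omega),
        pv_find_none xs 2 (by omega), pv_find_none xs 3 (by omega),
        pv_find_none xs 4 (by omega), hz]
    rfl
  · rw [pv_find_none xs 0 (by omega), pv_find_none xs 1 (by omega),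
        pv_find_none xs 2 (by omega), pv_find_none xs 3 (by omega),
        pv_find_none xs 4 (by omega), pv_find_none xs 5 (by omega),
        my_find?_congr _ _ xs (fun x hx => pv_gt_pred x (by have := pvM_le xs x hx; omega)),
        hz]
    rfl
  · rw [pv_find_none xs 0 (by omega), pv_find_none xs 1 (by omega),
        pv_find_none xs 2 (by omega), pv_find_none xs 3 (by omega),
        pv_find_none xs 4 (by omega), pv_find_none xs 5 (by omega),
        my_find?_congr _ _ xs (fun x hx => pv_gt_pred x (by have := pvM_le xs x hx; omega)),
        pv_find_none xs 6 (by omega),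
        my_find?_congr _ _ xs (fun x hx => pv_ag_pred x (by have := pvM_le xs x hx; omega)),
        hz]
    rfl
  · rw [pv_find_none xs 0 (by omega), pv_find_none xs 1 (by omega),
        pv_find_none xs 2 (by omega), pv_find_none xs 3 (by omega),
        pv_find_none xs 4 (by omega), pv_find_none xs 5 (by omega),
        my_find?_congr _ _ xs (fun x hx => pv_gt_pred x (by have := pvM_le xs x hx; omega)),
        pv_find_none xs 6 (by omega),
        my_find?_congr _ _ xs (fun x hx => pv_ag_pred x (by have := pvM_le xs x hx; omega)),
        pv_find_none xs 7 (by omega)]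
    -- all ranks are 8: the pick is the head, i.e. pvS c
    have hc8 : pvR c = 8 := by
      have := pvM_le xs c (by simp [hxs]); have := pvR_le8 c; omega
    have hfc : List.find? (fun x => pvR x == 8) xs = some c := by
      rw [hxs]
      exact List.find?_cons_of_pos (by simp [hc8])
    have hcz : c = z := by
      have := hfc.symm.trans hz
      injection this
    rw [← hcz]
    rfl

-- pure min-scan corresponding to pvBLoop with the index argument erased
def pvG : List String → Nat × String → Nat × String
  | [], t => t
  | c :: cs, (br, bs) => if pvR c < br then pvG cs (pvR c, pvS c) else pvG cs (br, bs)

theorem pvBLoop_some (cs : List String) :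
    ∀ i br bi bs, bi < i →
      ∃ bi', pvBLoop cs i (some (br, bi, bs)) =
        some ((pvG cs (br, bs)).1, bi', (pvG cs (br, bs)).2) := by
  induction cs with
  | nil => intro i br bi bs h; exact ⟨bi, by simp [pvBLoop, pvG]⟩
  | cons c l ih =>
    intro i br bi bs h
    simp only [pvBLoop, pvG]
    have hpvR : pvRank (PySem.Str.lower (PySem.Str.strip c)) = pvR c := rfl
    by_cases hr : pvR c < br
    · rw [if_pos (by simp [hpvR]; omega), if_pos hr]
      exact ih (i + 1) (pvR c) i (pvS c) (by omega)
    · rw [if_neg (by simp [hpvR]; omega), if_neg hr]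
      exact ih (i + 1) br bi bs (by omega)

theorem pvG_char (cs : List String) : ∀ br bs,
    pvG cs (br, bs) =
      ((cs.map pvR).foldr min br,
       if (cs.map pvR).foldr min br < br
       then ((cs.find? (fun x => pvR x == (cs.map pvR).foldr min br)).map pvS).getD bs
       else bs) := by
  induction cs with
  | nil =>
    intro br bs
    rw [show pvG [] (br, bs) = (br, bs) from rfl]
    simp only [List.map_nil, List.foldr_nil, List.find?_nil]
    rw [if_neg (lt_irrefl br)]
  | cons d ds ih =>
    intro br bs
    rw [show pvG (d :: ds) (br, bs) =
          (if pvR d < br then pvG ds (pvR d, pvS d) else pvG ds (br, bs)) from rfl]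
    rw [List.map_cons, List.foldr_cons, List.find?_cons]
    by_cases hr : pvR d < br
    · rw [if_pos hr, ih (pvR d) (pvS d)]
      have hm2 : (ds.map pvR).foldr min (pvR d) = min (pvR d) ((ds.map pvR).foldr min br) :=
        pv_foldr_min_init (by omega)
      have hle2 : (ds.map pvR).foldr min (pvR d) ≤ pvR d := pv_foldr_min_le_init _ _
      simp only [Prod.mk.injEq]
      refine ⟨by omega, ?_⟩
      by_cases h2 : (ds.map pvR).foldr min (pvR d) < pvR d
      · -- the minimum lies strictly inside ds: head d does not match, defaults never used
        rw [if_pos h2, if_pos (by omega),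
            show (pvR d == min (pvR d) ((ds.map pvR).foldr min br)) = false from by simp; omega]
        obtain ⟨z, hzf⟩ := pv_find_min_some ds (pvR d) h2
        rw [← hm2, hzf]; rfl
      · -- the head is (a) minimum: both sides give pvS d
        have hde : (ds.map pvR).foldr min (pvR d) = pvR d := by omega
        rw [if_neg h2, if_pos (by omega),
            show (pvR d == min (pvR d) ((ds.map pvR).foldr min br)) = true from by simp; omega]
        rfl
    · rw [if_neg hr, ih br bs]
      have hle1 : (ds.map pvR).foldr min br ≤ br := pv_foldr_min_le_init _ _
      simp only [Prod.mk.injEq]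
      refine ⟨by omega, ?_⟩
      by_cases h1 : (ds.map pvR).foldr min br < br
      · rw [if_pos h1, if_pos (by omega),
            show (pvR d == min (pvR d) ((ds.map pvR).foldr min br)) = false from by simp; omega,
            show min (pvR d) ((ds.map pvR).foldr min br) = (ds.map pvR).foldr min br from by omega]
      · rw [if_neg h1, if_neg (by omega)]

-- B = leftmost column of minimal rank, for nonempty input
theorem pvB_char (c : String) (cs : List String) :
    guess_baseline_column_py_alt (c :: cs) = (pvPick (c :: cs)).getD (pvS c) := by
  unfold guess_baseline_column_py_alt
  have hstep : pvBLoop (c :: cs) 0 none = pvBLoop cs 1 (some (pvR c, 0, pvS c)) := rfl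
  rw [hstep]
  obtain ⟨bi', hb⟩ := pvBLoop_some cs 1 (pvR c) 0 (pvS c) (by omega)
  rw [hb, pvG_char cs (pvR c) (pvS c)]
  have hM : pvM (c :: cs) = (cs.map pvR).foldr min (pvR c) := by
    unfold pvM
    simp only [List.map_cons, List.foldr_cons]
    rw [pv_foldr_min_init (pvR_le8 c)]
  have hle : (cs.map pvR).foldr min (pvR c) ≤ pvR c := pv_foldr_min_le_init _ _
  unfold pvPick
  rw [List.find?_cons]
  by_cases h : (cs.map pvR).foldr min (pvR c) < pvR c
  · rw [if_pos h, show (pvR c == pvM (c :: cs)) = false from by simp [hM]; omega, hM]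
  · rw [if_neg h, show (pvR c == pvM (c :: cs)) = true from by simp [hM]; omega]
    rfl

-- ===== VERDICT (by name: the statement is the Claim_ definition above) =====
theorem guess_baseline_column_py_spec : Claim_equal_guess_baseline_column_py := by
  intro colnames _
  unfold Spec_guess_baseline_column_py
  cases colnames with
  | nil => rfl
  | cons c cs => rw [pvA_char, pvB_char]
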